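-- pv_equiv track=rewrite | github.com/Mattgiron940/roofing-lead-gen | Downloads/roofing_scraper_auto_mode/scrapers/storm_integration.py | categorize_event_type
-- ===== SOURCE A (Python) =====
-- def categorize_event_type(event_type: str) -> str:
--     """Categorize storm event type"""
--     event_lower = event_type.lower()
--
--     if any(term in event_lower for term in ['hail', 'hailstorm']):
--         return "Hail"
--     elif any(term in event_lower for term in ['tornado', 'funnel']):
--         return "Tornado"
--     elif any(term in event_lower for term in ['wind', 'thunderstorm wind', 'straight-line']):
--         return "High Wind"
--     elif any(term in event_lower for term in ['thunderstorm', 'severe thunderstorm']):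
--         return "Severe Thunderstorm"
--     elif any(term in event_lower for term in ['flood', 'flash flood']):
--         return "Flood"
--     else:
--         return "Severe Weather"
-- ===== SOURCE B (Python) =====
-- # Single left-to-right scan: at each position check the flat priority keyword
-- # table for a match and keep the minimum priority seen; redundant compound
-- # keywords (e.g. "hailstorm", "thunderstorm wind") are dropped because each
-- # contains a keyword of the same priority.
-- KEYWORDS = [
--     ("hail", 0),
--     ("tornado", 1),
--     ("funnel", 1),
--     ("wind", 2),
--     ("straight-line", 2),
--     ("thunderstorm", 3),
--     ("flood", 4),
-- ]
-- CATEGORIES = ["Hail", "Tornado", "High Wind", "Severe Thunderstorm", "Flood", "Severe Weather"]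
--
-- def categorize_event_type(event_type: str) -> str:
--     """Categorize storm event type"""
--     el = event_type.lower()
--     best = 5
--     while el:
--         for kw, pri in KEYWORDS:
--             if pri < best and el.startswith(kw):
--                 best = pri
--         el = el[1:]
--     return CATEGORIES[best]
-- ===== Notes on version B (the rewrite author's own statement) =====
-- stated objective: alternative
-- what changed: Instead of a branch chain of whole-string substring tests, B makes one left-to-right scan over the lowercased string, keeping the minimum priority of any keyword from a flat (keyword, priority) table that starts at the current position (redundant compound keywords dropped), and indexes a category list with the final minimum.
import Mathlib
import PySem

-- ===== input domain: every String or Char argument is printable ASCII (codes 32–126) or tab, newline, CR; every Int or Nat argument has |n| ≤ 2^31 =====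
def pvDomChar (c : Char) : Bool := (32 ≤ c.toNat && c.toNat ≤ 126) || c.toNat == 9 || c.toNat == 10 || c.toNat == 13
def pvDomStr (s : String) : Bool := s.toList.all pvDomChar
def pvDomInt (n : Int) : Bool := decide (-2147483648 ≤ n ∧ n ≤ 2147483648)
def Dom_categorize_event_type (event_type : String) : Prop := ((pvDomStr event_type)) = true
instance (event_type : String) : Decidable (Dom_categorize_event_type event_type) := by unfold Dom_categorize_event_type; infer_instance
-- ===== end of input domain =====

-- B replaces A's chain of per-keyword substring tests by a single left-to-right scan of the
-- lowercased string that keeps the minimum priority of any keyword starting at each position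
-- (redundant compound keywords dropped); same results, a different algorithm (alternative).

-- ===== PORT A =====
def categorize_event_type (event_type : String) : String :=
  let event_lower := PySem.Str.lower event_type
  if ["hail", "hailstorm"].any (fun term => PySem.Str.isIn term event_lower) then "Hail"
  else if ["tornado", "funnel"].any (fun term => PySem.Str.isIn term event_lower) then "Tornado"
  else if ["wind", "thunderstorm wind", "straight-line"].any (fun term => PySem.Str.isIn term event_lower) then "High Wind"
  else if ["thunderstorm", "severe thunderstorm"].any (fun term => PySem.Str.isIn term event_lower) then "Severe Thunderstorm"
  else if ["flood", "flash flood"].any (fun term => PySem.Str.isIn term event_lower) then "Flood"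
  else "Severe Weather"

-- ===== PORT B =====
-- flat (keyword, priority) table; priorities index pvCategories
def pvKwTable : List (List Char × Nat) :=
  [ ("hail".toList, 0)
  , ("tornado".toList, 1)
  , ("funnel".toList, 1)
  , ("wind".toList, 2)
  , ("straight-line".toList, 2)
  , ("thunderstorm".toList, 3)
  , ("flood".toList, 4) ]

def pvCategories : List String :=
  ["Hail", "Tornado", "High Wind", "Severe Thunderstorm", "Flood", "Severe Weather"]

-- the inner `for kw, pri in KEYWORDS: if pri < best and el.startswith(kw): best = pri`
def pvKwStep (s : List Char) (best : Nat) : Nat :=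
  pvKwTable.foldl (fun b kp => if decide (kp.2 < b) && PySem.Chars.startswith s kp.1 then kp.2 else b) best

-- the `while el:` loop: update best at the current position, then drop one char (el = el[1:])
def pvScan : List Char → Nat → Nat
  | [], best => best
  | c :: rest, best => pvScan rest (pvKwStep (c :: rest) best)

def categorize_event_type_alt (event_type : String) : String :=
  pvCategories.getD (pvScan (PySem.Str.lower event_type).toList 5) "Severe Weather"

-- ===== PRECONDITION & SPEC =====
def Spec_categorize_event_type (event_type : String) (out : String) : Prop := out = categorize_event_type_alt event_type
instance (event_type : String) (out : String) : Decidable (Spec_categorize_event_type event_type out) := by unfold Spec_categorize_event_type; infer_instance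

-- ===== CLAIM (what is proved, stated in full; the proofs are below) =====
def Claim_equal_categorize_event_type : Prop := ∀ (event_type : String), Dom_categorize_event_type event_type → Spec_categorize_event_type event_type (categorize_event_type event_type)

-- ===== LEMMAS AND PROOFS =====

def pvF (s : List Char) : Nat → (List Char × Nat) → Nat :=
  fun b kp => if decide (kp.2 < b) && PySem.Chars.startswith s kp.1 then kp.2 else b

lemma pvF_le (s : List Char) (b : Nat) (kp : List Char × Nat) : pvF s b kp ≤ b := by
  unfold pvF; split
  · rename_i h; simp only [Bool.and_eq_true, decide_eq_true_eq] at h; omega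
  · exact le_refl b

lemma pvF_min (s : List Char) (b c : Nat) (kp : List Char × Nat) (h : b ≤ c) :
    pvF s b kp = min b (pvF s c kp) := by
  unfold pvF
  by_cases hs : PySem.Chars.startswith s kp.1 = true <;> simp [hs]
  · split_ifs <;> omega
  · omega

lemma pvFoldF_le (s : List Char) (t : List (List Char × Nat)) :
    ∀ b : Nat, t.foldl (pvF s) b ≤ b := by
  induction t with
  | nil => intro b; simp [List.foldl]
  | cons kp rest ih =>
      intro b
      calc (kp :: rest).foldl (pvF s) b = rest.foldl (pvF s) (pvF s b kp) := rfl
        _ ≤ pvF s b kp := ih _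
        _ ≤ b := pvF_le s b kp

lemma pvFoldF_min (s : List Char) (t : List (List Char × Nat)) :
    ∀ b c : Nat, b ≤ c → t.foldl (pvF s) b = min b (t.foldl (pvF s) c) := by
  induction t with
  | nil => intro b c h; simp [List.foldl]; omega
  | cons kp rest ih =>
      intro b c h
      have h1 : pvF s b kp = min b (pvF s c kp) := pvF_min s b c kp h
      have h2 : pvF s b kp ≤ pvF s c kp := by rw [h1]; exact min_le_right _ _
      have h3 := ih (pvF s b kp) (pvF s c kp) h2
      have h4 : rest.foldl (pvF s) (pvF s c kp) ≤ pvF s c kp := pvFoldF_le s rest _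
      show rest.foldl (pvF s) (pvF s b kp) = min b (rest.foldl (pvF s) (pvF s c kp))
      rw [h3, h1]
      omega

lemma pvFoldF_le_iff (s : List Char) (t : List (List Char × Nat)) :
    ∀ b p : Nat, t.foldl (pvF s) b ≤ p ↔ b ≤ p ∨ ∃ kp ∈ t, kp.2 ≤ p ∧ kp.1 <+: s := by
  induction t with
  | nil => intro b p; simp [List.foldl]
  | cons kp rest ih =>
      intro b p
      have hstep : pvF s b kp ≤ p ↔ b ≤ p ∨ (kp.2 ≤ p ∧ kp.1 <+: s) := by
        unfold pvF
        by_cases hs : PySem.Chars.startswith s kp.1 = true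
        · have hpre : kp.1 <+: s := (PySem.Chars.startswith_iff s kp.1).mp hs
          simp only [hs, Bool.and_true]
          split_ifs with hlt <;> simp only [decide_eq_true_eq] at hlt <;>
            constructor <;> intro h <;> first | omega | tauto
        · have hpre : ¬ kp.1 <+: s := fun hp =>
            hs ((PySem.Chars.startswith_iff s kp.1).mpr hp)
          simp [hs, hpre]
      show rest.foldl (pvF s) (pvF s b kp) ≤ p ↔ _
      rw [ih (pvF s b kp) p, hstep]
      simp only [List.exists_mem_cons_iff]
      tauto

lemma pvScan_le (l : List Char) : ∀ b : Nat, pvScan l b ≤ b := by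
  induction l with
  | nil => intro b; simp [pvScan]
  | cons c rest ih =>
      intro b
      calc pvScan (c :: rest) b = pvScan rest (pvKwStep (c :: rest) b) := rfl
        _ ≤ pvKwStep (c :: rest) b := ih _
        _ ≤ b := pvFoldF_le _ _ _

lemma pvScan_min (l : List Char) : ∀ b c : Nat, b ≤ c → pvScan l b = min b (pvScan l c) := by
  induction l with
  | nil => intro b c h; simp [pvScan]; omega
  | cons ch rest ih =>
      intro b c h
      have h1 : pvKwStep (ch :: rest) b = min b (pvKwStep (ch :: rest) c) :=
        pvFoldF_min _ _ _ _ h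
      have h2 : pvKwStep (ch :: rest) b ≤ pvKwStep (ch :: rest) c := by
        rw [h1]; exact min_le_right _ _
      have h3 := ih _ _ h2
      have h4 : pvScan rest (pvKwStep (ch :: rest) c) ≤ pvKwStep (ch :: rest) c :=
        pvScan_le rest _
      show pvScan rest (pvKwStep (ch :: rest) b) = min b (pvScan rest (pvKwStep (ch :: rest) c))
      rw [h3, h1]
      omega

def pvBest (l : List Char) : Nat := pvScan l 5

lemma pvBest_cons (c : Char) (t : List Char) :
    pvBest (c :: t) = min (pvKwStep (c :: t) 5) (pvBest t) := by
  show pvScan t (pvKwStep (c :: t) 5) = _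
  exact pvScan_min t _ 5 (pvFoldF_le _ _ _)

lemma pvBest_le_iff (l : List Char) (p : Nat) (hp : p < 5) :
    pvBest l ≤ p ↔ ∃ kp ∈ pvKwTable, kp.2 ≤ p ∧ kp.1 <:+: l := by
  induction l with
  | nil =>
      constructor
      · intro h; exfalso; unfold pvBest pvScan at h; omega
      · rintro ⟨kp, hm, _, hinf⟩
        exfalso
        rw [List.infix_nil] at hinf
        simp only [pvKwTable, List.mem_cons, List.not_mem_nil, or_false] at hm
        rcases hm with rfl | rfl | rfl | rfl | rfl | rfl | rfl <;> simp at hinf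
  | cons c t ih =>
      have hfold : pvKwStep (c :: t) 5 ≤ p ↔ 5 ≤ p ∨ ∃ kp ∈ pvKwTable, kp.2 ≤ p ∧ kp.1 <+: c :: t :=
        pvFoldF_le_iff (c :: t) pvKwTable 5 p
      rw [pvBest_cons, min_le_iff, hfold, ih]
      constructor
      · rintro ((h | ⟨kp, hm, h1, h2⟩) | ⟨kp, hm, h1, h2⟩)
        · omega
        · exact ⟨kp, hm, h1, h2.isInfix⟩
        · exact ⟨kp, hm, h1, h2.trans (List.suffix_cons c t).isInfix⟩
      · rintro ⟨kp, hm, h1, h2⟩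
        rw [List.infix_cons_iff] at h2
        rcases h2 with h2 | h2
        · exact Or.inl (Or.inr ⟨kp, hm, h1, h2⟩)
        · exact Or.inr ⟨kp, hm, h1, h2⟩

lemma pvBest_gt (l : List Char) (p : Nat) (hp : p < 5)
    (h : ∀ kp ∈ pvKwTable, kp.2 ≤ p → ¬ kp.1 <:+: l) : ¬ pvBest l ≤ p := by
  rw [pvBest_le_iff l p hp]
  rintro ⟨kp, hm, h1, h2⟩
  exact h kp hm h1 h2

lemma pvBest_ub (l : List Char) (kw : List Char) (pri : Nat)
    (hm : (kw, pri) ∈ pvKwTable) (hpri : pri < 5) (hinf : kw <:+: l) : pvBest l ≤ pri :=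
  (pvBest_le_iff l pri hpri).mpr ⟨(kw, pri), hm, le_refl _, hinf⟩

-- ===== VERDICT (by name: the statement is the Claim_ definition above) =====
theorem categorize_event_type_spec : Claim_equal_categorize_event_type := by
  intro s _
  unfold Spec_categorize_event_type categorize_event_type categorize_event_type_alt
  rw [show pvScan (PySem.Str.lower s).toList 5 = pvBest (PySem.Str.lower s).toList from rfl]
  set L := (PySem.Str.lower s).toList with hL
  simp only [List.any_cons, List.any_nil, Bool.or_false]
  split_ifs with h1 h2 h3 h4 h5
  · -- Hail
    simp only [Bool.or_eq_true, PySem.Str.isIn_iff_infix, ← hL] at h1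
    have hin : "hail".toList <:+: L := by
      rcases h1 with h | h
      · exact h
      · exact (by decide : "hail".toList <:+: "hailstorm".toList).trans h
    have hle : pvBest L ≤ 0 := pvBest_ub L "hail".toList 0 (by decide) (by omega) hin
    have : pvBest L = 0 := Nat.le_zero.mp hle
    rw [this]; rfl
  · -- Tornado
    simp only [Bool.or_eq_true, not_or, PySem.Str.isIn_iff_infix, ← hL] at h1 h2
    have hle : pvBest L ≤ 1 := by
      rcases h2 with h | h
      · exact pvBest_ub L "tornado".toList 1 (by decide) (by omega) h
      · exact pvBest_ub L "funnel".toList 1 (by decide) (by omega) h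
    have hgt : ¬ pvBest L ≤ 0 := by
      apply pvBest_gt L 0 (by omega)
      intro kp hm hle2
      simp only [pvKwTable, List.mem_cons, List.not_mem_nil, or_false] at hm
      rcases hm with rfl | rfl | rfl | rfl | rfl | rfl | rfl <;> simp only at hle2 ⊢ <;>
        first | omega | exact h1.1
    have : pvBest L = 1 := by omega
    rw [this]; rfl
  · -- High Wind
    simp only [Bool.or_eq_true, not_or, PySem.Str.isIn_iff_infix, ← hL] at h1 h2 h3
    have hle : pvBest L ≤ 2 := by
      rcases h3 with h | h | h
      · exact pvBest_ub L "wind".toList 2 (by decide) (by omega) h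
      · exact pvBest_ub L "wind".toList 2 (by decide) (by omega)
          ((by decide : "wind".toList <:+: "thunderstorm wind".toList).trans h)
      · exact pvBest_ub L "straight-line".toList 2 (by decide) (by omega) h
    have hgt : ¬ pvBest L ≤ 1 := by
      apply pvBest_gt L 1 (by omega)
      intro kp hm hle2
      simp only [pvKwTable, List.mem_cons, List.not_mem_nil, or_false] at hm
      rcases hm with rfl | rfl | rfl | rfl | rfl | rfl | rfl <;> simp only at hle2 ⊢ <;>
        first | omega | exact h1.1 | exact h2.1 | exact h2.2
    have : pvBest L = 2 := by omega
    rw [this]; rfl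
  · -- Severe Thunderstorm
    simp only [Bool.or_eq_true, not_or, PySem.Str.isIn_iff_infix, ← hL] at h1 h2 h3 h4
    have hle : pvBest L ≤ 3 := by
      rcases h4 with h | h
      · exact pvBest_ub L "thunderstorm".toList 3 (by decide) (by omega) h
      · exact pvBest_ub L "thunderstorm".toList 3 (by decide) (by omega)
          ((by decide : "thunderstorm".toList <:+: "severe thunderstorm".toList).trans h)
    have hgt : ¬ pvBest L ≤ 2 := by
      apply pvBest_gt L 2 (by omega)
      intro kp hm hle2
      simp only [pvKwTable, List.mem_cons, List.not_mem_nil, or_false] at hm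
      rcases hm with rfl | rfl | rfl | rfl | rfl | rfl | rfl <;> simp only at hle2 ⊢ <;>
        first | omega | exact h1.1 | exact h2.1 | exact h2.2 | exact h3.1 | exact h3.2.2
    have : pvBest L = 3 := by omega
    rw [this]; rfl
  · -- Flood
    simp only [Bool.or_eq_true, not_or, PySem.Str.isIn_iff_infix, ← hL] at h1 h2 h3 h4 h5
    have hle : pvBest L ≤ 4 := by
      rcases h5 with h | h
      · exact pvBest_ub L "flood".toList 4 (by decide) (by omega) h
      · exact pvBest_ub L "flood".toList 4 (by decide) (by omega)
          ((by decide : "flood".toList <:+: "flash flood".toList).trans h)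
    have hgt : ¬ pvBest L ≤ 3 := by
      apply pvBest_gt L 3 (by omega)
      intro kp hm hle2
      simp only [pvKwTable, List.mem_cons, List.not_mem_nil, or_false] at hm
      rcases hm with rfl | rfl | rfl | rfl | rfl | rfl | rfl <;> simp only at hle2 ⊢ <;>
        first | omega | exact h1.1 | exact h2.1 | exact h2.2 | exact h3.1 | exact h3.2.2 | exact h4.1
    have : pvBest L = 4 := by omega
    rw [this]; rfl
  · -- Severe Weather
    simp only [Bool.or_eq_true, not_or, PySem.Str.isIn_iff_infix, ← hL] at h1 h2 h3 h4 h5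
    have hle : pvBest L ≤ 5 := pvScan_le L 5
    have hgt : ¬ pvBest L ≤ 4 := by
      apply pvBest_gt L 4 (by omega)
      intro kp hm hle2
      simp only [pvKwTable, List.mem_cons, List.not_mem_nil, or_false] at hm
      rcases hm with rfl | rfl | rfl | rfl | rfl | rfl | rfl <;> simp only at hle2 ⊢ <;>
        first | omega | exact h1.1 | exact h2.1 | exact h2.2 | exact h3.1 | exact h3.2.2 | exact h4.1 | exact h5.1
    have : pvBest L = 5 := by omega
    rw [this]; rfl
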